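-- pv_equiv track=rewrite | github.com/BYU-CSA/old-ctf-challenges | cryptography/b-z then 10/base17-16.py | base_17_to_base_16
-- ===== SOURCE A (Python) =====
-- def base_17_to_base_16(number):
--     decimal = 0
--     power = 0
--     for digit in number[::-1]:
--         if digit.isdigit():
--             decimal += int(digit) * (17 ** power)
--         else:
--             decimal += (ord(digit) - 55) * (17 ** power)
--         power += 1
--     result = ''
--     while decimal > 0:
--         remainder = decimal % 16
--         if remainder < 10:
--             result = str(remainder) + result
--         else:
--             result = chr(55 + remainder) + result
--         decimal = decimal // 16
--     return result
-- ===== SOURCE B (Python) =====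
-- def base_17_to_base_16(number):
--     value = 0
--     for digit in number:
--         if digit.isdigit():
--             value = value * 17 + int(digit)
--         else:
--             value = value * 17 + (ord(digit) - 55)
--     digits = []
--     while value > 0:
--         value, r = divmod(value, 16)
--         digits.append("0123456789ABCDEF"[r])
--     return ''.join(reversed(digits))
-- ===== Notes on version B (the rewrite author's own statement) =====
-- stated objective: faster
-- what changed: Parsing uses Horner's rule (value = value*17 + digit) over the forward string instead of recomputing 17**power per reversed digit, and the hex digits are collected in a list via a lookup table and joined once instead of repeated string prepending.
import Mathlib
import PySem

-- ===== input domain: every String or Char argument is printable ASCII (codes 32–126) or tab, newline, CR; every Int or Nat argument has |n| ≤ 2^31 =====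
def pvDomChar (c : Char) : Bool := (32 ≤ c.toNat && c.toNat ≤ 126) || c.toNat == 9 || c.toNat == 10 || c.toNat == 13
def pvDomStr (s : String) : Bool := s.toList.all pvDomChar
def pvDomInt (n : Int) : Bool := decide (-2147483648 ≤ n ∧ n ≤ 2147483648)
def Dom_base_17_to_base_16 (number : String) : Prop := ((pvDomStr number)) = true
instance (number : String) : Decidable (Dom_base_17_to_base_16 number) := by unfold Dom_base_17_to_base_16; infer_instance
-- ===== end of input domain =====

-- B replaces A's per-digit 17**power recomputation with Horner's rule and builds the hex string
-- once from a digit list instead of repeated prepending (objective: faster, asymptotic).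


-- shared by both ports: the value of one base-17 digit character,
-- `int(digit) if digit.isdigit() else ord(digit) - 55` (both Pythons compute it the same way)
def pvCharVal (digit : Char) : Int :=
  if PySem.Chars.isdigit digit then (PySem.Int.ofChars? [digit]).getD 0  -- int(digit); always `some` when isdigit
  else (digit.toNat : Int) - 55                                         -- ord(digit) - 55

-- ===== PORT A =====
-- termination fact for A's while loop (cited in decreasing_by)
theorem pvFloordiv16_toNat_lt (d : Int) (h : 0 < d) :
    (PySem.Int.floordiv d 16).toNat < d.toNat := by
  rw [PySem.Int.floordiv_eq_ediv_of_pos (by omega)]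
  omega

-- A's while loop: result = str(remainder)/chr(55+remainder) prepended each step
def pvWhileA (decimal : Int) (result : List Char) : List Char :=
  if h : 0 < decimal then
    let remainder := PySem.Int.mod decimal 16
    pvWhileA (PySem.Int.floordiv decimal 16)
      ((if remainder < 10 then PySem.Int.toChars remainder
        else [Char.ofNat (55 + remainder).toNat]) ++ result)   -- chr(55+remainder): 65 ≤ 55+r ≤ 70, exact
  else result
termination_by decimal.toNat
decreasing_by exact pvFloordiv16_toNat_lt decimal h

def base_17_to_base_16 (number : String) : String :=
  -- for digit in number[::-1]: accumulate (decimal, power); number[::-1] is reverse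
  -- (PySem.List.slice?_none_none_neg_one); power only counts up from 0, kept as Nat so 17 ** power = 17 ^ power
  let st := (number.toList.reverse).foldl
    (fun (st : Int × Nat) digit => (st.1 + pvCharVal digit * 17 ^ st.2, st.2 + 1))
    ((0 : Int), (0 : Nat))
  String.ofList (pvWhileA st.1 [])

-- ===== PORT B =====
-- B's while loop: value, r = divmod(value, 16); digits.append("0123456789ABCDEF"[r])
def pvDigitsB (value : Int) : List Char :=
  if h : 0 < value then
    let q := PySem.Int.floordiv value 16
    let r := PySem.Int.mod value 16
    (PySem.List.pyGet? "0123456789ABCDEF".toList r).getD ' ' :: pvDigitsB q  -- 0 ≤ r < 16: always `some`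
  else []
termination_by value.toNat
decreasing_by exact pvFloordiv16_toNat_lt value h

def base_17_to_base_16_alt (number : String) : String :=
  -- Horner: value = value * 17 + digit, forward over the string
  let value := number.toList.foldl (fun v digit => v * 17 + pvCharVal digit) 0
  String.ofList (pvDigitsB value).reverse  -- ''.join(reversed(digits))

-- ===== PRECONDITION & SPEC =====
def Spec_base_17_to_base_16 (number : String) (out : String) : Prop := out = base_17_to_base_16_alt number
instance (number : String) (out : String) : Decidable (Spec_base_17_to_base_16 number out) := by unfold Spec_base_17_to_base_16; infer_instance

-- ===== CLAIM (what is proved, stated in full; the proofs are below) =====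
def Claim_equal_base_17_to_base_16 : Prop := ∀ (number : String), Dom_base_17_to_base_16 number → Spec_base_17_to_base_16 number (base_17_to_base_16 number)

-- ===== LEMMAS AND PROOFS =====

-- Horner with a nonzero accumulator
theorem pvHorner_acc (l : List Char) (a : Int) :
    l.foldl (fun v digit => v * 17 + pvCharVal digit) a
      = a * 17 ^ l.length + l.foldl (fun v digit => v * 17 + pvCharVal digit) 0 := by
  induction l generalizing a with
  | nil => simp
  | cons c l ih =>
    simp only [List.foldl_cons, List.length_cons]
    rw [ih (a * 17 + pvCharVal c), ih (0 * 17 + pvCharVal c)]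
    ring

-- the power component of A's fold counts the digits
theorem pvFoldA_snd (m : List Char) (d : Int) (p : Nat) :
    ((m.foldl (fun (st : Int × Nat) digit => (st.1 + pvCharVal digit * 17 ^ st.2, st.2 + 1)) (d, p)).2)
      = p + m.length := by
  induction m generalizing d p with
  | nil => simp
  | cons c m ih => simp [List.foldl_cons, ih]; omega

-- A's positional sum over the reversed string equals B's Horner value
theorem pvFoldA_fst (l : List Char) (d : Int) (p : Nat) :
    ((l.reverse.foldl (fun (st : Int × Nat) digit => (st.1 + pvCharVal digit * 17 ^ st.2, st.2 + 1)) (d, p)).1)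
      = d + (l.foldl (fun v digit => v * 17 + pvCharVal digit) 0) * 17 ^ p := by
  induction l generalizing d p with
  | nil => simp
  | cons c l ih =>
    rw [List.reverse_cons, List.foldl_append]
    have h2 := pvFoldA_snd l.reverse d p
    rw [List.length_reverse] at h2
    simp only [List.foldl_cons, List.foldl_nil, List.foldl_cons] at *
    rw [h2, ih d p, pvHorner_acc l (0 * 17 + pvCharVal c)]
    rw [pow_add]
    ring

-- the hex digit A prepends equals B's table lookup, for 0 ≤ r < 16
theorem pvDigitChar_eq (r : Int) (h0 : 0 ≤ r) (h16 : r < 16) :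
    (if r < 10 then PySem.Int.toChars r else [Char.ofNat (55 + r).toNat])
      = [(PySem.List.pyGet? "0123456789ABCDEF".toList r).getD ' '] := by
  interval_cases r <;> decide

-- A's while loop builds exactly the reverse of B's digit list, prepended to `result`
theorem pvWhile_eq_digits (d : Int) (res : List Char) :
    pvWhileA d res = (pvDigitsB d).reverse ++ res := by
  by_cases h : 0 < d
  · rw [pvWhileA, pvDigitsB]
    simp only [h, dite_true]
    have hm0 := PySem.Int.mod_nonneg d (b := 16) (by omega)
    have hm16 := PySem.Int.mod_lt d (b := 16) (by omega)
    rw [pvDigitChar_eq _ hm0 hm16,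
        pvWhile_eq_digits (PySem.Int.floordiv d 16)]
    simp
  · rw [pvWhileA, pvDigitsB]
    simp [h]
termination_by d.toNat
decreasing_by exact pvFloordiv16_toNat_lt d h

-- ===== VERDICT (by name: the statement is the Claim_ definition above) =====
theorem base_17_to_base_16_spec : Claim_equal_base_17_to_base_16 := by
  intro number _
  unfold Spec_base_17_to_base_16 base_17_to_base_16 base_17_to_base_16_alt
  simp only [pvWhile_eq_digits, pvFoldA_fst number.toList 0 0]
  simp
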